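-- pv_equiv track=rewrite | github.com/sushilk001/outskills-hakathon | agents/rca_agent.py | _parse_root_causes
-- ===== SOURCE A (Python) =====
-- from typing import Dict, Any, List
--
-- def _parse_root_causes(llm_output: str) -> List[Dict]:
--     """Parse root causes from LLM output"""
--     causes = []
--     lines = llm_output.strip().split('\n')
--     current_cause = {}
--
--     for line in lines:
--         line = line.strip()
--         if line and (line[0].isdigit() or line.startswith('-') or line.startswith('*')):
--             if current_cause:
--                 causes.append(current_cause)
--             current_cause = {"cause": line.lstrip('0123456789.-* '), "evidence": "", "impact": ""}
--         elif line and current_cause: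
--             if not current_cause["evidence"]:
--                 current_cause["evidence"] = line
--             else:
--                 current_cause["impact"] = line
--
--     if current_cause:
--         causes.append(current_cause)
--
--     return causes[:5] if causes else [{"cause": llm_output[:200], "evidence": "See analysis", "impact": "Multiple systems"}]
-- ===== SOURCE B (Python) =====
-- from typing import Dict, Any, List
--
-- def _parse_root_causes(llm_output: str) -> List[Dict]:
--     """Parse root causes from LLM output (group-then-transform pipeline)."""
--     LEAD = '0123456789.-* '
--
--     def is_header(l):
--         return bool(l) and (l[0].isdigit() or l[0] in '-*')
--
--     def build(header, body):
--         followers = [l for l in body if l]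
--         return {"cause": header.lstrip(LEAD),
--                 "evidence": followers[0] if followers else "",
--                 "impact": followers[-1] if len(followers) > 1 else ""}
--
--     lines = [ln.strip() for ln in llm_output.strip().split('\n')]
--     i = 0
--     while i < len(lines) and not is_header(lines[i]):
--         i += 1
--     records = []
--     while i < len(lines):
--         j = i + 1
--         while j < len(lines) and not is_header(lines[j]):
--             j += 1
--         records.append(build(lines[i], lines[i + 1:j]))
--         i = j
--     return records[:5] if records else [{"cause": llm_output[:200], "evidence": "See analysis", "impact": "Multiple systems"}]
-- ===== Notes on version B (the rewrite author's own statement) =====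
-- stated objective: alternative
-- what changed: Replaced A's single-pass mutable state machine (current_cause dict mutated and flushed while iterating) by a pipeline that first scans to the first header line, then splits the lines into header-led groups and maps each group to its record via a pure build step.
import Mathlib
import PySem

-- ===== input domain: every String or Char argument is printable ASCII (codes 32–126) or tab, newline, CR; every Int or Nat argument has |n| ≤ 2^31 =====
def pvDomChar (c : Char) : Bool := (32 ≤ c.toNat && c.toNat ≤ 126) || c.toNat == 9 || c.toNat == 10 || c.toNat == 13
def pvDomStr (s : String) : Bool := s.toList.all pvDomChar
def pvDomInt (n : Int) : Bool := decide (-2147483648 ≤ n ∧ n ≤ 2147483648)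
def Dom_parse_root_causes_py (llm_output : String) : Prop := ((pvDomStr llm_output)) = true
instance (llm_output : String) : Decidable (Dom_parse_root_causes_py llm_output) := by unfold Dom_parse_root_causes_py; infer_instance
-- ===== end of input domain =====

-- B replaces A's mutable-dict state machine by a group-then-transform pipeline (alternative decomposition, same cost).

-- ===== PORT A =====
-- hand port of str.lstrip('0123456789.-* '): drop leading characters of that set (exact on all inputs)
def pvLstripLead (s : String) : String :=
  String.ofList (s.toList.dropWhile (fun c => "0123456789.-* ".toList.contains c))

-- 'line and (line[0].isdigit() or line.startswith('-') or line.startswith('*'))'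
def pvHeaderA (line : String) : Bool :=
  !(line == "") &&
    ((PySem.Str.pyGet? line 0).any PySem.Chars.isdigit ||
      PySem.Str.startswith line "-" || PySem.Str.startswith line "*")

-- one iteration of A's for-loop over (causes, current_cause)
def pvStepA (acc : List (List (String × String)) × PySem.Dict String String) (rawline : String) :
    List (List (String × String)) × PySem.Dict String String :=
  let line := PySem.Str.strip rawline
  if pvHeaderA line then
    ((if acc.2.items == [] then acc.1 else acc.1 ++ [acc.2.items]),
     PySem.Dict.mk [("cause", pvLstripLead line), ("evidence", ""), ("impact", "")])
  else if !(line == "") && !(acc.2.items == []) then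
    (if PySem.Dict.getD acc.2 "evidence" "" == "" then (acc.1, PySem.Dict.insert acc.2 "evidence" line)
     else (acc.1, PySem.Dict.insert acc.2 "impact" line))
  else acc

def parse_root_causes_py (llm_output : String) : List (List (String × String)) :=
  let lines := (PySem.Str.split? (PySem.Str.strip llm_output) "\n").getD []
  let r := List.foldl pvStepA ([], PySem.Dict.mk []) lines
  let causes := if r.2.items == [] then r.1 else r.1 ++ [r.2.items]
  if causes == [] then
    [[("cause", PySem.Str.slice llm_output none (some 200)),
      ("evidence", "See analysis"), ("impact", "Multiple systems")]]
  else causes.take 5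

-- ===== PORT B =====
-- 'bool(l) and (l[0].isdigit() or l[0] in "-*")'
def pvIsHeaderB (l : String) : Bool :=
  match l.toList with
  | [] => false
  | c :: _ => PySem.Chars.isdigit c || c == '-' || c == '*'

-- build(header, body): record of one header-led group
def pvBuildB (header : String) (body : List String) : List (String × String) :=
  let followers := body.filter (fun l => !(l == ""))
  [("cause", pvLstripLead header),
   ("evidence", followers.headD ""),
   ("impact", if 1 < followers.length then followers.getLastD "" else "")]

-- the two inner while-loops: cut off the group of the leading header, recurse on the rest
def pvGroupsB : List String → List (List (String × String))
  | [] => []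
  | h :: rest =>
    pvBuildB h (rest.takeWhile (fun l => !pvIsHeaderB l)) ::
      pvGroupsB (rest.dropWhile (fun l => !pvIsHeaderB l))
  termination_by l => l.length
  decreasing_by
    exact Nat.lt_succ_of_le (List.length_dropWhile_le _ _)

def parse_root_causes_py_alt (llm_output : String) : List (List (String × String)) :=
  let lines := ((PySem.Str.split? (PySem.Str.strip llm_output) "\n").getD []).map PySem.Str.strip
  let records := pvGroupsB (lines.dropWhile (fun l => !pvIsHeaderB l))
  if records == [] then
    [[("cause", PySem.Str.slice llm_output none (some 200)),
      ("evidence", "See analysis"), ("impact", "Multiple systems")]]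
  else records.take 5

-- ===== PRECONDITION & SPEC =====
def Spec_parse_root_causes_py (llm_output : String) (out : List (List (String × String))) : Prop := out = parse_root_causes_py_alt llm_output
instance (llm_output : String) (out : List (List (String × String))) : Decidable (Spec_parse_root_causes_py llm_output out) := by unfold Spec_parse_root_causes_py; infer_instance

-- ===== CLAIM (what is proved, stated in full; the proofs are below) =====
def Claim_equal_parse_root_causes_py : Prop := ∀ (llm_output : String), Dom_parse_root_causes_py llm_output → Spec_parse_root_causes_py llm_output (parse_root_causes_py llm_output)

-- ===== LEMMAS AND PROOFS =====

-- A's step, with the stripping factored out (pvStepA rawline = pvStep (strip rawline))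
def pvStep (acc : List (List (String × String)) × PySem.Dict String String) (line : String) :
    List (List (String × String)) × PySem.Dict String String :=
  if pvHeaderA line then
    ((if acc.2.items == [] then acc.1 else acc.1 ++ [acc.2.items]),
     PySem.Dict.mk [("cause", pvLstripLead line), ("evidence", ""), ("impact", "")])
  else if !(line == "") && !(acc.2.items == []) then
    (if PySem.Dict.getD acc.2 "evidence" "" == "" then (acc.1, PySem.Dict.insert acc.2 "evidence" line)
     else (acc.1, PySem.Dict.insert acc.2 "impact" line))
  else acc

-- the record value A's state holds after a header with cause c and nonempty followers fs
def pvRec (c : String) (fs : List String) : List (String × String) :=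
  [("cause", c), ("evidence", fs.headD ""),
   ("impact", if 1 < fs.length then fs.getLastD "" else "")]

theorem pvBuildB_eq (h : String) (body : List String) :
    pvBuildB h body = pvRec (pvLstripLead h) (body.filter (fun l => !(l == ""))) := rfl

theorem pvHeader_eq (l : String) : pvHeaderA l = pvIsHeaderB l := by
  unfold pvHeaderA pvIsHeaderB
  have h0 : (l == "") = l.toList.isEmpty := by
    by_cases h : l = ""
    · simp [h]
    · rw [beq_eq_false_iff_ne.mpr h,
        List.isEmpty_eq_false_iff.mpr (fun hh => h (String.toList_eq_nil_iff.mp hh))]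
  have hg : PySem.Str.pyGet? l 0 = l.toList[(0:Nat)]? := by
    simpa using PySem.Str.pyGet?_natCast l 0
  rw [h0, hg, PySem.Str.startswith_eq, PySem.Str.startswith_eq]
  cases hl : l.toList with
  | nil => simp
  | cons c cs =>
    simp [PySem.Chars.startswith, List.isPrefixOf]
    rw [show ('-' == c) = (c == '-') from BEq.comm, show ('*' == c) = (c == '*') from BEq.comm]

theorem pvStep_follower (cs c fs) (l : String) (hl : l ≠ "") (hh : pvIsHeaderB l = false)
    (hfs : ∀ x ∈ fs, x ≠ "") :
    pvStep (cs, PySem.Dict.mk (pvRec c fs)) l = (cs, PySem.Dict.mk (pvRec c (fs ++ [l]))) := by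
  have hA : pvHeaderA l = false := by rw [pvHeader_eq]; exact hh
  have hl' : (l == "") = false := beq_eq_false_iff_ne.mpr hl
  cases fs with
  | nil =>
    simp [pvStep, hA, hl', pvRec, PySem.Dict.getD, PySem.Dict.get?, PySem.Dict.insert,
      PySem.Dict.contains]
  | cons f fs' =>
    have hf : (f == "") = false := beq_eq_false_iff_ne.mpr (hfs f (by simp))
    simp [pvStep, hA, hl', pvRec, PySem.Dict.getD, PySem.Dict.get?, PySem.Dict.insert,
      PySem.Dict.contains, hf]
    have hlast : (f :: (fs' ++ [l])).getLast? = some l := by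
      rw [← List.cons_append, List.getLast?_concat]
    simp [hlast]

theorem pvFold_skip (ls : List String) (cs) :
    List.foldl pvStep (cs, PySem.Dict.mk []) ls =
      List.foldl pvStep (cs, PySem.Dict.mk []) (ls.dropWhile (fun l => !pvIsHeaderB l)) := by
  induction ls with
  | nil => rfl
  | cons a ls ih =>
    by_cases ha : pvIsHeaderB a
    · simp [ha]
    · have hA : pvHeaderA a = false := by rw [pvHeader_eq]; simpa using ha
      have hstep : pvStep (cs, PySem.Dict.mk []) a = (cs, PySem.Dict.mk []) := by
        simp [pvStep, hA]
      simp only [List.dropWhile_cons]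
      simp only [ha]
      simpa [List.foldl_cons, hstep] using ih

theorem pvFold_group (ls : List String) (cs c fs) (hfs : ∀ x ∈ fs, x ≠ "") :
    (if (List.foldl pvStep (cs, PySem.Dict.mk (pvRec c fs)) ls).2.items == [] then
        (List.foldl pvStep (cs, PySem.Dict.mk (pvRec c fs)) ls).1
      else (List.foldl pvStep (cs, PySem.Dict.mk (pvRec c fs)) ls).1 ++
        [(List.foldl pvStep (cs, PySem.Dict.mk (pvRec c fs)) ls).2.items]) =
      cs ++ (pvRec c (fs ++ (ls.takeWhile (fun l => !pvIsHeaderB l)).filter (fun l => !(l == ""))) ::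
        pvGroupsB (ls.dropWhile (fun l => !pvIsHeaderB l))) := by
  induction ls generalizing cs c fs with
  | nil => simp [pvRec, pvGroupsB]
  | cons l ls ih =>
    by_cases hh : pvIsHeaderB l
    · have hA : pvHeaderA l = true := by rw [pvHeader_eq]; exact hh
      have hstep : pvStep (cs, PySem.Dict.mk (pvRec c fs)) l =
          (cs ++ [pvRec c fs], PySem.Dict.mk (pvRec (pvLstripLead l) [])) := by
        simp [pvStep, hA, pvRec]
      rw [List.foldl_cons, hstep]
      rw [ih (cs ++ [pvRec c fs]) (pvLstripLead l) [] (by simp)]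
      simp only [List.takeWhile_cons, List.dropWhile_cons, hh]
      simp [pvGroupsB, pvBuildB_eq]
    · by_cases hl : l = ""
      · subst hl
        have hstep : pvStep (cs, PySem.Dict.mk (pvRec c fs)) "" = (cs, PySem.Dict.mk (pvRec c fs)) := by
          simp [pvStep, pvHeaderA]
        rw [List.foldl_cons, hstep, ih cs c fs hfs]
        simp [hh]
      · have hfs' : ∀ x ∈ fs ++ [l], x ≠ "" := by
          intro x hx
          rcases List.mem_append.mp hx with hx1 | hx1
          · exact hfs x hx1
          · rw [List.mem_singleton.mp hx1]; exact hl
        rw [List.foldl_cons, pvStep_follower cs c fs l hl (by simpa using hh) hfs,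
          ih cs c (fs ++ [l]) hfs']
        simp [hh, beq_eq_false_iff_ne.mpr hl]

theorem pvDropWhile_head (p : String → Bool) (l : List String) (h t)
    (hd : l.dropWhile p = h :: t) : p h = false := by
  induction l with
  | nil => simp at hd
  | cons a l ih =>
    by_cases ha : p a
    · simp [ha] at hd; exact ih hd
    · simp [ha] at hd
      simpa [← hd.1] using ha

-- ===== VERDICT (by name: the statement is the Claim_ definition above) =====
theorem parse_root_causes_py_spec : Claim_equal_parse_root_causes_py := by
  intro s _
  unfold Spec_parse_root_causes_py parse_root_causes_py parse_root_causes_py_alt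
  dsimp only
  have hmap : List.foldl pvStepA ([], PySem.Dict.mk [])
      ((PySem.Str.split? (PySem.Str.strip s) "\n").getD []) =
      List.foldl pvStep ([], PySem.Dict.mk [])
        (((PySem.Str.split? (PySem.Str.strip s) "\n").getD []).map PySem.Str.strip) := by
    rw [List.foldl_map]; rfl
  rw [hmap, pvFold_skip]
  cases hdrop : (((PySem.Str.split? (PySem.Str.strip s) "\n").getD []).map PySem.Str.strip).dropWhile
      (fun l => !pvIsHeaderB l) with
  | nil => simp [pvGroupsB]
  | cons h t =>
    have hPh : pvIsHeaderB h = true := by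
      have := pvDropWhile_head _ _ _ _ hdrop
      simpa using this
    have hA : pvHeaderA h = true := by rw [pvHeader_eq]; exact hPh
    have hstep : pvStep ([], PySem.Dict.mk []) h =
        ([], PySem.Dict.mk (pvRec (pvLstripLead h) [])) := by
      simp [pvStep, hA, pvRec]
    rw [List.foldl_cons, hstep]
    have := pvFold_group t [] (pvLstripLead h) [] (by simp)
    simp only [List.nil_append] at this
    rw [this]
    simp [pvGroupsB, pvBuildB_eq]
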